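-- pv_equiv track=rewrite | github.com/mblsha/binja-esr | sc62015/pysc62015/test_emulator.py | compute_expected_dsll
-- ===== SOURCE A (Python) =====
-- from typing import Dict, Tuple, List, NamedTuple, Optional
--
-- def compute_expected_dsll(logical_bcd_bytes: List[int]) -> List[int]:
--     """
--     Computes the result of DSLL operation on BCD bytes.
--     logical_bcd_bytes is [MSB_val, MSB-1_val, ..., LSB_val].
--     e.g., for BCD 123456, input is [0x12, 0x34, 0x56].
--     Result for 123456 -> 234560 is [0x23, 0x45, 0x60].
--     """
--     if not logical_bcd_bytes:
--         return []
--
--     count = len(logical_bcd_bytes)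
--     shifted_bytes = [0] * count
--
--     # u carries the LOW nibble of the previous (more significant) byte
--     # to become the low nibble of the current (less significant) byte.
--     # For the most significant byte, there's no "previous" byte, so u starts as 0.
--     u_carry_from_prev_low_nibble = 0
--
--     # Iterate from MSB to LSB (index 0 to count-1)
--     for i in range(count):
--         old_current_byte_val = logical_bcd_bytes[i]
--         old_current_low_nibble = old_current_byte_val & 0x0F
--
--         # New byte's high nibble is the old_current_byte's low nibble.
--         # New byte's low nibble is u (which was the LOW nibble of the previous byte).
--         shifted_bytes[i] = (old_current_low_nibble << 4) | u_carry_from_prev_low_nibble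
--
--         # Update u for the next iteration using the low nibble of the current byte
--         u_carry_from_prev_low_nibble = old_current_low_nibble
--
--     return shifted_bytes
-- ===== SOURCE B (Python) =====
-- from typing import List
--
-- def compute_expected_dsll(logical_bcd_bytes: List[int]) -> List[int]:
--     # Big-integer arithmetic: pack the low nibbles one per byte into a single
--     # integer n; the DSLL result, as one number, is 16*n + (n >> 8) (high
--     # nibbles come from n shifted up one nibble, low nibbles from n shifted
--     # down one byte); then unpack that number back into bytes.
--     lows = bytes(b & 0x0F for b in logical_bcd_bytes)
--     n = int.from_bytes(lows, 'big')
--     x = n * 16 + (n >> 8)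
--     return list(x.to_bytes(len(lows), 'big'))
-- ===== Notes on version B (the rewrite author's own statement) =====
-- stated objective: alternative
-- what changed: Replaces the per-byte carry loop with big-integer arithmetic: pack all low nibbles into one integer via int.from_bytes, compute the whole shifted number as 16*n + (n >> 8) in one arithmetic step, and unpack it back into bytes via int.to_bytes.
import Mathlib
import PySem

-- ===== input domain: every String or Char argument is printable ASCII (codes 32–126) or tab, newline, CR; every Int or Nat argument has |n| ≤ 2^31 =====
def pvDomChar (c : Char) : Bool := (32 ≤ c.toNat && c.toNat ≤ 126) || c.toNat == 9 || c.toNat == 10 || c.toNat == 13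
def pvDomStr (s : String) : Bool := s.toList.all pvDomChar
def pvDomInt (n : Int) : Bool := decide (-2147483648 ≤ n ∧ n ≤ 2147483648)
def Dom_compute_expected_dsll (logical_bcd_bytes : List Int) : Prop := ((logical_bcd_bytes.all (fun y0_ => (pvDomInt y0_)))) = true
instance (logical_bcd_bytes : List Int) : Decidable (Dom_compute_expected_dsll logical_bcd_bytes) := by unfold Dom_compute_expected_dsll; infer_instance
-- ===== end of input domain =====

-- B replaces A's per-byte carry loop with big-integer arithmetic (pack the low nibbles into one integer n, compute the whole shifted number as 16*n + n//256, unpack it into bytes); objective: alternative algorithm, not faster.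


-- ===== PORT A =====
-- Literal port of A: the loop from MSB to LSB threading the previous byte's low nibble u.
def dsllLoopA (u : Int) : List Int → List Int
  | [] => []
  | b :: rest =>
    let low := PySem.Int.band b 0x0F
    (PySem.Int.bor (low <<< (4:Nat)) u) :: dsllLoopA low rest

def compute_expected_dsll (logical_bcd_bytes : List Int) : List Int :=
  if logical_bcd_bytes = [] then []
  else dsllLoopA 0 logical_bcd_bytes

-- ===== PORT B =====
-- Port of B: pack the low nibbles into one integer n via int.from_bytes, form x = 16*n + (n >> 8),
-- unpack x into bytes via int.to_bytes.  int.from_bytes(lows, 'big') is ported by hand as the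
-- big-endian Horner fold, and int.to_bytes(k, 'big') as k low-byte extractions reversed; both are
-- exact here (every byte of lows is in [0,16) and 0 <= x < 256^k, so to_bytes cannot overflow).
def dsllUnpack : Nat → Int → List Int
  | 0, _ => []
  | Nat.succ k, x => PySem.Int.mod x 256 :: dsllUnpack k (PySem.Int.floordiv x 256)

def compute_expected_dsll_alt (logical_bcd_bytes : List Int) : List Int :=
  let lows := logical_bcd_bytes.map (fun b => PySem.Int.band b 0x0F)
  let n := lows.foldl (fun a b => a * 256 + b) 0
  let x := n * 16 + (n >>> (8:Nat))
  (dsllUnpack lows.length x).reverse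

-- ===== PRECONDITION & SPEC =====
def Spec_compute_expected_dsll (logical_bcd_bytes : List Int) (out : List Int) : Prop := out = compute_expected_dsll_alt logical_bcd_bytes
instance (logical_bcd_bytes : List Int) (out : List Int) : Decidable (Spec_compute_expected_dsll logical_bcd_bytes out) := by unfold Spec_compute_expected_dsll; infer_instance

-- ===== CLAIM (what is proved, stated in full; the proofs are below) =====
def Claim_equal_compute_expected_dsll : Prop := ∀ (logical_bcd_bytes : List Int), Dom_compute_expected_dsll logical_bcd_bytes → Spec_compute_expected_dsll logical_bcd_bytes (compute_expected_dsll logical_bcd_bytes)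

-- ===== LEMMAS AND PROOFS =====

-- the low-nibble list both programs mask out
def pvLows (xs : List Int) : List Int := xs.map (fun b => PySem.Int.band b 0x0F)

-- common description of the output: byte i = 16 * low_i + low_{i-1}, threaded as u
def pvG (u : Int) : List Int → List Int
  | [] => []
  | l :: L => (16 * l + u) :: pvG l L

-- Horner packing of a digit list, base 256
def pvPack (L : List Int) : Int := L.foldl (fun n d => n * 256 + d) 0

theorem pvBand15_bounds (b : Int) : 0 ≤ PySem.Int.band b 0x0F ∧ PySem.Int.band b 0x0F < 16 := by
  unfold PySem.Int.band
  by_cases hb : 0 ≤ b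
  · simp only [hb, show (0:Int) ≤ 0x0F by norm_num, if_pos]
    have h : b.toNat &&& (0x0F:Int).toNat ≤ (0x0F:Int).toNat := Nat.and_le_right
    constructor <;> omega
  · simp only [hb, if_false, show (0:Int) ≤ 0x0F by norm_num, if_pos]
    constructor <;> omega

theorem pvShiftOr (l u : Int) (hl : 0 ≤ l ∧ l < 16) (hu : 0 ≤ u ∧ u < 16) :
    PySem.Int.bor (l <<< (4:Nat)) u = 16 * l + u := by
  obtain ⟨hl0, hl1⟩ := hl; obtain ⟨hu0, hu1⟩ := hu
  interval_cases l <;> interval_cases u <;> decide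

theorem dsllLoopA_eq_pvG (xs : List Int) : ∀ u, 0 ≤ u ∧ u < 16 →
    dsllLoopA u xs = pvG u (pvLows xs) := by
  induction xs with
  | nil => intro u _; rfl
  | cons b rest ih =>
    intro u hu
    simp only [dsllLoopA, pvLows, List.map_cons, pvG]
    rw [pvShiftOr _ _ (pvBand15_bounds b) hu, ih _ (pvBand15_bounds b)]
    rfl

theorem pvPack_foldl (L : List Int) : ∀ init : Int,
    L.foldl (fun n d => n * 256 + d) init = init * 256 ^ L.length + pvPack L := by
  induction L with
  | nil => intro init; simp [pvPack]
  | cons d L ih =>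
    intro init
    simp only [List.foldl_cons, List.length_cons, pvPack]
    rw [ih (init * 256 + d), ih (0 * 256 + d)]
    ring

theorem pvPack_cons (l : Int) (L : List Int) :
    pvPack (l :: L) = l * 256 ^ L.length + pvPack L := by
  show L.foldl _ (0 * 256 + l) = _
  rw [pvPack_foldl]; ring

theorem pvG_length (u : Int) (L : List Int) : (pvG u L).length = L.length := by
  induction L generalizing u with
  | nil => rfl
  | cons l L ih => simpa [pvG] using ih l

theorem pvG_digits (u : Int) (L : List Int) (hu : 0 ≤ u ∧ u < 16)
    (h : ∀ d ∈ L, 0 ≤ d ∧ d < 16) : ∀ d ∈ pvG u L, 0 ≤ d ∧ d < 256 := by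
  induction L generalizing u with
  | nil => intro d hd; simp [pvG] at hd
  | cons l L ih =>
    intro d hd
    simp only [pvG, List.mem_cons] at hd
    rcases hd with rfl | hd
    · have hl := h l (by simp); omega
    · exact ih l (h l (by simp)) (fun d hd => h d (by simp [hd])) d hd

theorem pvPack_pvG (L : List Int) (hL : L ≠ []) (h : ∀ d ∈ L, 0 ≤ d ∧ d < 16) :
    ∀ u, 0 ≤ u ∧ u < 16 →
    pvPack (pvG u L) = 16 * pvPack L + pvPack L / 256 + u * 256 ^ (L.length - 1) := by
  induction L with
  | nil => exact absurd rfl hL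
  | cons l L ih =>
    intro u hu
    obtain ⟨hl0, hl1⟩ := h l (by simp)
    cases L with
    | nil =>
      simp only [pvG, pvPack_cons, List.length_cons, List.length_nil]
      have : l / 256 = 0 := Int.ediv_eq_zero_of_lt hl0 (by omega)
      simp [pvPack]
      omega
    | cons l' L' =>
      have hM : (l' :: L') ≠ [] := by simp
      have hdig : ∀ d ∈ (l' :: L'), 0 ≤ d ∧ d < 16 := fun d hd => h d (List.mem_cons_of_mem _ hd)
      have key := ih hM hdig l ⟨hl0, hl1⟩
      show pvPack ((16 * l + u) :: pvG l (l' :: L')) = _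
      rw [pvPack_cons, key, pvG_length]
      set m := (l' :: L').length with hm
      have hm1 : 1 ≤ m := by simp [hm]
      set V' := pvPack (l' :: L') with hV'
      have hpow : (256:Int) ^ m = 256 ^ (m - 1) * 256 := by
        conv_lhs => rw [show m = (m-1) + 1 by omega]
        ring
      have hsplit : pvPack (l :: l' :: L') = l * 256 ^ m + V' := pvPack_cons l (l' :: L')
      have hdiv : (l * 256 ^ m + V') / 256 = l * 256 ^ (m - 1) + V' / 256 := by
        rw [hpow, show l * (256 ^ (m-1) * 256) + V' = V' + (l * 256 ^ (m-1)) * 256 by ring,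
          Int.add_mul_ediv_right _ _ (by norm_num)]
        ring
      have hlen2 : (l :: l' :: L').length - 1 = m := by simp [hm]
      rw [hsplit, hdiv, hlen2, hpow]
      ring

theorem pvPack_append_singleton (C : List Int) (d : Int) :
    pvPack (C ++ [d]) = pvPack C * 256 + d := by
  simp [pvPack, List.foldl_append]

theorem pvUnpack_pvPack (C : List Int) (h : ∀ d ∈ C, 0 ≤ d ∧ d < 256) :
    dsllUnpack C.length (pvPack C) = C.reverse := by
  induction C using List.reverseRecOn with
  | nil => rfl
  | append_singleton C' d ih =>
    obtain ⟨hd0, hd1⟩ := h d (by simp)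
    have hdig : ∀ e ∈ C', 0 ≤ e ∧ e < 256 := fun e he => h e (by simp [he])
    have hlen : (C' ++ [d]).length = C'.length + 1 := by simp
    rw [pvPack_append_singleton, hlen]
    show PySem.Int.mod _ 256 :: dsllUnpack C'.length (PySem.Int.floordiv _ 256) = _
    rw [PySem.Int.mod_eq_emod_of_pos (by norm_num),
      PySem.Int.floordiv_eq_ediv_of_pos (by norm_num),
      show pvPack C' * 256 + d = d + pvPack C' * 256 by ring,
      Int.add_mul_emod_self_right, Int.emod_eq_of_lt hd0 hd1,
      Int.add_mul_ediv_right _ _ (by norm_num : (256:Int) ≠ 0),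
      Int.ediv_eq_zero_of_lt hd0 hd1, zero_add, ih hdig]
    simp

-- ===== VERDICT (by name: the statement is the Claim_ definition above) =====
theorem compute_expected_dsll_spec : Claim_equal_compute_expected_dsll := by
  intro xs _
  show compute_expected_dsll xs = compute_expected_dsll_alt xs
  cases xs with
  | nil => decide
  | cons b rest =>
    set xs := b :: rest with hxs
    have hne : xs ≠ [] := by simp [hxs]
    have hdigL : ∀ d ∈ pvLows xs, 0 ≤ d ∧ d < 16 := by
      intro d hd
      simp only [pvLows, List.mem_map] at hd
      obtain ⟨a, _, rfl⟩ := hd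
      exact pvBand15_bounds a
    have hLne : pvLows xs ≠ [] := by simp [pvLows, hxs]
    have hA : compute_expected_dsll xs = pvG 0 (pvLows xs) := by
      rw [compute_expected_dsll, if_neg hne]
      exact dsllLoopA_eq_pvG xs 0 (by norm_num)
    -- B's big integer x is the packing of the common output description
    have hx : pvPack (pvLows xs) * 16 + (pvPack (pvLows xs) >>> (8:Nat))
        = pvPack (pvG 0 (pvLows xs)) := by
      rw [Int.shiftRight_eq_div_pow,
        pvPack_pvG (pvLows xs) hLne hdigL 0 (by norm_num)]
      norm_num
      ring
    have hdigC : ∀ d ∈ pvG 0 (pvLows xs), 0 ≤ d ∧ d < 256 :=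
      pvG_digits 0 (pvLows xs) (by norm_num) hdigL
    have hlenC : (pvG 0 (pvLows xs)).length = xs.length := by
      rw [pvG_length]; simp [pvLows]
    rw [hA, compute_expected_dsll_alt]
    have e1 : List.map (fun b => PySem.Int.band b 0x0F) xs = pvLows xs := rfl
    have e2 : List.foldl (fun (a b : Int) => a * 256 + b) 0 (pvLows xs) = pvPack (pvLows xs) := rfl
    rw [e1, e2]
    push_cast
    rw [hx]
    have hlenL : (pvLows xs).length = (pvG 0 (pvLows xs)).length := (pvG_length 0 _).symm
    rw [hlenL, pvUnpack_pvPack _ hdigC]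
    simp
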